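-- pv_equiv track=rewrite | github.com/1325075688gw/people_counting | 杨家辉-点云聚类/cluster.py | cluster_by_tag
-- ===== SOURCE A (Python) =====
-- def cluster_by_tag(points, tag):
--     # 根据聚类得到的标签对点云分类
--     tem_dict = {}
--     # 按照类别将点分类
--     key_list = []
--     for i in tag:
--         if i not in key_list:
--             key_list.append(i)
--     # key_list = sorted(key_list)
--     for i in key_list:
--         tem_dict[i] = []
--     for t, point in zip(tag, points):
--         tem_dict[t].append(point)
--     return tem_dict
-- ===== SOURCE B (Python) =====
-- def cluster_by_tag(points, tag):
--     # Group by tag: distinct tags in first-appearance order, then one rescan per key.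
--     keys = list(dict.fromkeys(tag))
--     pairs = list(zip(tag, points))
--     return {k: [p for t, p in pairs if t == k] for k in keys}
-- ===== Notes on version B (the rewrite author's own statement) =====
-- stated objective: simpler
-- what changed: Replaces the three sequential loops (manual membership-scan key collection, empty-list initialisation, grouping-append pass) with an ordered dedup of the tags followed by a dict comprehension that filters the zipped pairs once per distinct key.
import Mathlib
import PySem

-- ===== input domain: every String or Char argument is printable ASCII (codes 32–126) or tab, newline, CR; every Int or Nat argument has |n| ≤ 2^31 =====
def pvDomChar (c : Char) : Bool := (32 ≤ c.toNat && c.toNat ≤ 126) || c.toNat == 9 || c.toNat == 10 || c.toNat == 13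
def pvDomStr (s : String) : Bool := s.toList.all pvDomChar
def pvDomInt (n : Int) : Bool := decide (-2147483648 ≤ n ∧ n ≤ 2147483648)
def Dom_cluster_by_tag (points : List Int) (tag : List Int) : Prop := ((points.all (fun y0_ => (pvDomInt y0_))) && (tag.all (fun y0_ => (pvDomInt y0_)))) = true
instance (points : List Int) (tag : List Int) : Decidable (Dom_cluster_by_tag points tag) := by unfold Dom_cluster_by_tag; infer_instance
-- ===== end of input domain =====

-- B replaces A's three sequential loops by an ordered dedup plus a per-key filter comprehension (simpler decomposition, same cost).

-- ===== PORT A =====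
def cluster_by_tag (points : List Int) (tag : List Int) : List (Int × List Int) :=
  -- key_list: append each tag not yet seen
  let key_list := tag.foldl (fun ks i => if i ∈ ks then ks else ks ++ [i]) []
  -- tem_dict[i] = [] for each key
  let d0 := key_list.foldl (fun d k => d.insert k ([] : List Int)) PySem.Dict.empty
  -- tem_dict[t].append(point); t is always a present key, so modify with default [] is exact
  let d := (tag.zip points).foldl (fun d tp => d.modify tp.1 [] (fun l => l ++ [tp.2])) d0
  d.items

-- ===== PORT B =====
def cluster_by_tag_alt (points : List Int) (tag : List Int) : List (Int × List Int) :=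
  let keys := PySem.List.dedup tag
  let pairs := tag.zip points
  (keys.foldl
    (fun d k => d.insert k ((pairs.filter (fun tp => tp.1 == k)).map (·.2)))
    (PySem.Dict.empty : PySem.Dict Int (List Int))).items

-- ===== PRECONDITION & SPEC =====
def Spec_cluster_by_tag (points : List Int) (tag : List Int) (out : List (Int × List Int)) : Prop := out = cluster_by_tag_alt points tag
instance (points : List Int) (tag : List Int) (out : List (Int × List Int)) : Decidable (Spec_cluster_by_tag points tag out) := by unfold Spec_cluster_by_tag; infer_instance

-- ===== CLAIM (what is proved, stated in full; the proofs are below) =====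
def Claim_equal_cluster_by_tag : Prop := ∀ (points : List Int) (tag : List Int), Dom_cluster_by_tag points tag → Spec_cluster_by_tag points tag (cluster_by_tag points tag)

-- ===== LEMMAS AND PROOFS =====

-- A's manual membership-scan loop is exactly Set.ofList (first occurrences in order)
theorem keyList_eq_ofList (tag : List Int) :
    tag.foldl (fun ks i => if i ∈ ks then ks else ks ++ [i]) [] = PySem.Set.ofList tag := by
  rw [PySem.Set.ofList_eq_foldl]
  have hf : (fun (ks : List Int) i => if i ∈ ks then ks else ks ++ [i])
      = fun ks i => PySem.Set.add ks i := by
    funext ks i; rw [PySem.Set.add_eq_ite]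
  rw [hf]

-- B's side: a fold of fresh inserts is the map
theorem alt_eq_map (points tag : List Int) :
    cluster_by_tag_alt points tag =
      (PySem.Set.ofList tag).map
        (fun k => (k, ((tag.zip points).filter (fun tp => tp.1 == k)).map (·.2))) := by
  unfold cluster_by_tag_alt
  simp only [PySem.List.dedup_eq_ofList]
  rw [PySem.Dict.items_foldl_insert_fresh (k := fun a => a)]
  · simp [PySem.Dict.empty]
  · intro a _; exact PySem.Dict.contains_empty a
  · simp [PySem.Set.nodup_ofList tag]

theorem cluster_by_tag_spec : Claim_equal_cluster_by_tag := by
  intro points tag _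
  unfold Spec_cluster_by_tag
  rw [alt_eq_map]
  unfold cluster_by_tag
  simp only [keyList_eq_ofList]
  -- initial dict: fresh distinct keys, all values []
  have hnd : (PySem.Set.ofList tag).Nodup := PySem.Set.nodup_ofList tag
  have h0 : (PySem.Set.ofList tag).foldl
      (fun d k => d.insert k ([] : List Int)) PySem.Dict.empty
      = PySem.Dict.mk ((PySem.Set.ofList tag).map (fun k => (k, ([] : List Int)))) := by
    apply PySem.Dict.ext
    rw [PySem.Dict.items_foldl_insert_fresh (k := fun a => a)]
    · simp [PySem.Dict.empty]
    · intro a _; exact PySem.Dict.contains_empty a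
    · simp [hnd]
  rw [h0]
  set d0 : PySem.Dict Int (List Int) :=
    PySem.Dict.mk ((PySem.Set.ofList tag).map (fun k => (k, ([] : List Int)))) with hd0
  have hkeys0 : d0.keys = PySem.Set.ofList tag := by
    simp [hd0, PySem.Dict.keys, Function.comp_def]
  set d := (tag.zip points).foldl (fun d tp => d.modify tp.1 [] (fun l => l ++ [tp.2])) d0 with hd
  -- keys after the modify loop: unchanged (every t is already a key)
  have hkeys : d.keys = PySem.Set.ofList tag := by
    rw [hd, PySem.Dict.keys_foldl_modify_key (key := fun tp : Int × Int => tp.1), hkeys0,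
      PySem.Set.update_eq_append_filter]
    have hfil : List.filter (fun y => !PySem.Set.contains (PySem.Set.ofList tag) y)
        (PySem.Set.ofList (List.map (fun tp : Int × Int => tp.1) (tag.zip points))) = [] := by
      apply List.filter_eq_nil_iff.2
      intro y hy
      have h1 := (PySem.Set.mem_ofList _ _).1 hy
      rcases List.mem_map.1 h1 with ⟨tp, htp, rfl⟩
      simp only [Bool.not_eq_eq_eq_not, Bool.not_true, Bool.not_eq_false]
      rw [PySem.Set.contains_iff, PySem.Set.mem_ofList]
      exact (List.of_mem_zip htp).1
    rw [hfil, List.append_nil]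
  have hndk : d.keys.Nodup := hkeys ▸ hnd
  rw [PySem.Dict.items_eq_map_keys d hndk ([] : List Int), hkeys]
  apply List.map_congr_left
  intro k hk
  -- value at k: getD through the modify loop
  have hval : d.getD k [] = ((tag.zip points).filter (fun tp => tp.1 == k)).map (·.2) := by
    rw [hd, PySem.Dict.getD_foldl_modify_append]
    have hmem : (k, ([] : List Int)) ∈ d0.items := by
      simp [hd0]
      simpa using hk
    rw [PySem.Dict.getD_of_mem_items (d := d0) hmem (hkeys0.symm ▸ hnd), List.nil_append]
  rw [hval]
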